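-- pv_equiv track=rewrite | github.com/danielnachun/dotfiles_old | .config/bspwm/raise_window.py | include_args
-- ===== SOURCE A (Python) =====
-- def include_args(arg_list, win_property):
--     if len(arg_list) > 0:
--         if arg_list[0] in win_property:
--             return True
--         else:
--             del arg_list[-0]
--             return include_args(arg_list, win_property)
--     else:
--         return False
-- ===== SOURCE B (Python) =====
-- def include_args(arg_list, win_property):
--     # Return-value identical to A; A also empties arg_list up to the first
--     # match (side effect), which this idiomatic version does not reproduce.
--     return any(arg in win_property for arg in arg_list)
-- ===== Notes on version B (the rewrite author's own statement) =====
-- stated objective: idiomatic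
-- what changed: Recursion that repeatedly deletes the head of the list is replaced by a single any() generator over the list (return value only; A's in-place emptying of arg_list is not reproduced).
import Mathlib
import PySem

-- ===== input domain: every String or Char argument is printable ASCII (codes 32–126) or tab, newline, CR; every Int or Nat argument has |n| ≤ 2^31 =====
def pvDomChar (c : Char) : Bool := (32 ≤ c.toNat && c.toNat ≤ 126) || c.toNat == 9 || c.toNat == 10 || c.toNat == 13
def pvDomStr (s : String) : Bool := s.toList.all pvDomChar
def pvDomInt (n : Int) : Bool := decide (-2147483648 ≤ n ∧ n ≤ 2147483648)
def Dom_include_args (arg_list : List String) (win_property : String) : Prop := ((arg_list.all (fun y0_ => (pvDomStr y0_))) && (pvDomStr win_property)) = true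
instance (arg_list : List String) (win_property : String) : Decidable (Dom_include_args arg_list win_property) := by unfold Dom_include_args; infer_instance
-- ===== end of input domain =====

-- ===== PORT A =====
-- B is the idiomatic any() one-liner; equivalence is about the RETURN value only:
-- A also empties arg_list up to the first match (del arg_list[-0] = del arg_list[0]), B does not mutate it.
-- Recursive A: if the list is non-empty, test the head (substring test), else delete it and recurse.
def include_args (arg_list : List String) (win_property : String) : Bool :=
  match arg_list with
  | [] => false
  | a :: rest =>
    if PySem.Str.isIn a win_property then true
    else include_args rest win_property

-- ===== PORT B =====
def include_args_alt (arg_list : List String) (win_property : String) : Bool :=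
  arg_list.any (fun arg => PySem.Str.isIn arg win_property)

-- ===== PRECONDITION & SPEC =====
def Spec_include_args (arg_list : List String) (win_property : String) (out : Bool) : Prop := out = include_args_alt arg_list win_property
instance (arg_list : List String) (win_property : String) (out : Bool) : Decidable (Spec_include_args arg_list win_property out) := by unfold Spec_include_args; infer_instance

-- ===== CLAIM (what is proved, stated in full; the proofs are below) =====
def Claim_equal_include_args : Prop := ∀ (arg_list : List String) (win_property : String), Dom_include_args arg_list win_property → Spec_include_args arg_list win_property (include_args arg_list win_property)

-- ===== LEMMAS AND PROOFS =====

-- ===== VERDICT (by name: the statement is the Claim_ definition above) =====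
theorem include_args_eq_alt (arg_list : List String) (win_property : String) :
    include_args arg_list win_property = include_args_alt arg_list win_property := by
  induction arg_list with
  | nil => rfl
  | cons a rest ih =>
    simp only [include_args, include_args_alt, List.any_cons] at *
    by_cases h : PySem.Str.isIn a win_property
    · simp only [PySem.Str.isIn] at h
      simp [h]
    · simp only [PySem.Str.isIn] at h
      simp [h, ih]

-- ===== VERDICT =====
theorem include_args_spec : Claim_equal_include_args :=
  fun arg_list win_property _ => include_args_eq_alt arg_list win_property
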